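-- pv_equiv track=rewrite | github.com/przemyslawdziki/python1 | obliczeniaZaUzytkownika.py | mnozenie
-- ===== SOURCE A (Python) =====
-- def mnozenie(a, b, c):
--     _min = a
--     _max = b
--     _ods = c
--     total = 1
--
--     for i in range(_min, _max + 1, _ods):
--         total *= i
--     return total
-- ===== SOURCE B (Python) =====
-- def _prod(vals):
--     n = len(vals)
--     if n == 0:
--         return 1
--     if n == 1:
--         return vals[0]
--     m = n // 2
--     return _prod(vals[:m]) * _prod(vals[m:])
--
--
-- def mnozenie(a, b, c):
--     return _prod(list(range(a, b + 1, c)))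
-- ===== Notes on version B (the rewrite author's own statement) =====
-- stated objective: alternative
-- what changed: Replaces the left-to-right accumulating loop with a balanced divide-and-conquer product: materialise the range once, then recursively split it at the midpoint and multiply the two halves.
import Mathlib
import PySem

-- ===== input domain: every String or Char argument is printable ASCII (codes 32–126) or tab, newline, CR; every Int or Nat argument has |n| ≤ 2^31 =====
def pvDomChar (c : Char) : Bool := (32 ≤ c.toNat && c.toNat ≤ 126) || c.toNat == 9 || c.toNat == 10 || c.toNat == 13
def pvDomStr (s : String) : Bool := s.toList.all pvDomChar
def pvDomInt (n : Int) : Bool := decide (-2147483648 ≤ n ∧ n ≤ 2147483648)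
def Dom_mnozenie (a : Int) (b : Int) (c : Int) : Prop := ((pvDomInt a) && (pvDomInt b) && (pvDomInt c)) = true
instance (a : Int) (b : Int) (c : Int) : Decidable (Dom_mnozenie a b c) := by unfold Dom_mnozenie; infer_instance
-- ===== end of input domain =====

-- B replaces the left-to-right accumulating loop with a balanced divide-and-conquer product over the materialised range (alternative decomposition).

-- ===== PORT A =====
def mnozenie (a : Int) (b : Int) (c : Int) : Int :=
  (PySem.List.pyRange a (b + 1) c).foldl (fun total i => total * i) 1

-- ===== PORT B =====
-- balanced product: 1 for [], the element for a singleton, else split at n // 2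
def prodDC (l : List Int) : Int :=
  if _h0 : l.length = 0 then 1
  else if _h1 : l.length = 1 then l.headI
  else
    let m := l.length / 2
    prodDC (l.take m) * prodDC (l.drop m)
termination_by l.length
decreasing_by
  · simp only [List.length_take]; omega
  · simp only [List.length_drop]; omega

def mnozenie_alt (a : Int) (b : Int) (c : Int) : Int :=
  prodDC (PySem.List.pyRange a (b + 1) c)

-- ===== PRECONDITION & SPEC =====
-- A raises ValueError when the step c is 0 (range with zero step); excluded.
def Pre_mnozenie (a : Int) (b : Int) (c : Int) : Prop := c ≠ 0
instance (a : Int) (b : Int) (c : Int) : Decidable (Pre_mnozenie a b c) := by unfold Pre_mnozenie; infer_instance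
def pvWitness_mnozenie : Int × Int × Int := (1, 5, 1)

def Spec_mnozenie (a : Int) (b : Int) (c : Int) (out : Int) : Prop := out = mnozenie_alt a b c
instance (a : Int) (b : Int) (c : Int) (out : Int) : Decidable (Spec_mnozenie a b c out) := by unfold Spec_mnozenie; infer_instance

-- ===== CLAIM (what is proved, stated in full; the proofs are below) =====
def Claim_equal_mnozenie : Prop := ∀ (a : Int) (b : Int) (c : Int), Dom_mnozenie a b c → Pre_mnozenie a b c → Spec_mnozenie a b c (mnozenie a b c)

-- ===== LEMMAS AND PROOFS =====
theorem prodDC_eq_prod (l : List Int) : prodDC l = l.prod := by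
  fun_induction prodDC l with
  | case1 l h0 => simp [List.length_eq_zero_iff.mp h0]
  | case2 l h0 h1 =>
    obtain ⟨x, hx⟩ := List.length_eq_one_iff.mp h1
    simp [hx]
  | case3 l h0 h1 m ih1 ih2 =>
    rw [ih1, ih2, ← List.prod_append, List.take_append_drop]

-- ===== VERDICT (by name: the statement is the Claim_ definition above) =====
theorem mnozenie_spec : Claim_equal_mnozenie := by
  intro a b c _ _
  unfold Spec_mnozenie mnozenie mnozenie_alt
  rw [prodDC_eq_prod, List.prod_eq_foldl]
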